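-- pv_equiv track=rewrite | github.com/brunocazabat/Tech3_Projects | B-SEC-500-MAR-5-1-caesar/src/detect_aes_in_ecb.py | count_repetitions
-- ===== SOURCE A (Python) =====
-- def count_repetitions(ciphertext, index):
--     division = []
--     for i in range(0, len(ciphertext), 16):
--         division.append(ciphertext[i:i+16])
--     number_of_repetitions = len(division) - len(set(division))
--     line_number = index
--     result = {
--         'repetitions': number_of_repetitions,
--         'line': line_number
--     }
--     return result
-- ===== SOURCE B (Python) =====
-- def count_repetitions(ciphertext, index):
--     blocks = sorted(ciphertext[i:i+16] for i in range(0, len(ciphertext), 16))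
--     repetitions = 0
--     for prev, cur in zip(blocks, blocks[1:]):
--         if prev == cur:
--             repetitions += 1
--     return {'repetitions': repetitions, 'line': index}
-- ===== Notes on version B (the rewrite author's own statement) =====
-- stated objective: alternative
-- what changed: B sorts the 16-byte blocks and counts adjacent equal pairs in the sorted list (sort-then-scan), instead of A's list-vs-set length difference; each group of k equal blocks contributes k-1 adjacent pairs, which equals len - #distinct.
import Mathlib
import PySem

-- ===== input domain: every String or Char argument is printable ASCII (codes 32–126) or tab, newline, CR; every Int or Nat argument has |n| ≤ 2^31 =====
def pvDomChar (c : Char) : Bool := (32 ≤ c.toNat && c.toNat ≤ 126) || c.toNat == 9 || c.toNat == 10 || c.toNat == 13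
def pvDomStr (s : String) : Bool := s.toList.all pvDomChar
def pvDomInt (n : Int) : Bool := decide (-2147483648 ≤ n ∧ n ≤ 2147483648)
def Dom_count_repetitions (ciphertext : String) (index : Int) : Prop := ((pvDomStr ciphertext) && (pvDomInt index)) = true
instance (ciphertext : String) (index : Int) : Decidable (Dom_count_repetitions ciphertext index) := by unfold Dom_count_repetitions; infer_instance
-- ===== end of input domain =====

-- B replaces A's "block list length minus set length" with sort-then-scan: sort the
-- 16-byte blocks and count adjacent equal pairs (alternative algorithm, same result).

-- ===== PORT A =====
def count_repetitions (ciphertext : String) (index : Int) : List (String × Int) :=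
  let division := (PySem.List.pyRange 0 (PySem.Str.len ciphertext) 16).foldl
      (fun acc i => acc ++ [PySem.Str.slice ciphertext (some i) (some (i + 16))]) []
  let number_of_repetitions :=
    PySem.List.len division - PySem.List.len (PySem.Set.ofList division)
  let line_number := index
  [("repetitions", number_of_repetitions), ("line", line_number)]

-- ===== PORT B =====
def count_repetitions_alt (ciphertext : String) (index : Int) : List (String × Int) :=
  let blocks := PySem.List.sorted
      ((PySem.List.pyRange 0 (PySem.Str.len ciphertext) 16).map
        (fun i => PySem.Str.slice ciphertext (some i) (some (i + 16))))
      (fun x => x) false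
  let repetitions := (blocks.zip (PySem.List.slice blocks (some 1) none)).foldl
      (fun (c : Int) p => if p.1 = p.2 then c + 1 else c) 0
  [("repetitions", repetitions), ("line", index)]

-- ===== PRECONDITION & SPEC =====
def Spec_count_repetitions (ciphertext : String) (index : Int) (out : List (String × Int)) : Prop := out = count_repetitions_alt ciphertext index
instance (ciphertext : String) (index : Int) (out : List (String × Int)) : Decidable (Spec_count_repetitions ciphertext index out) := by unfold Spec_count_repetitions; infer_instance

-- ===== CLAIM (what is proved, stated in full; the proofs are below) =====
def Claim_equal_count_repetitions : Prop := ∀ (ciphertext : String) (index : Int), Dom_count_repetitions ciphertext index → Spec_count_repetitions ciphertext index (count_repetitions ciphertext index)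

-- ===== LEMMAS AND PROOFS =====

-- the adjacent-equal-pair count of a ≤-sorted list is its length minus its number of distinct elements
theorem adj_count_sorted (s : List String) (hs : s.Pairwise (· ≤ ·)) :
    ∀ c : Int, (s.zip s.tail).foldl (fun (c : Int) p => if p.1 = p.2 then c + 1 else c) c
      = c + (s.length : Int) - (s.toFinset.card : Int) := by
  induction s with
  | nil => intro c; simp
  | cons a t ih =>
    cases t with
    | nil => intro c; simp
    | cons b u =>
      intro c
      have hpt : (b :: u).Pairwise (· ≤ ·) := hs.tail
      have hab : a ≤ b := (List.pairwise_cons.mp hs).1 b (by simp)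
      by_cases h : a = b
      · have hfin : (a :: b :: u).toFinset = (b :: u).toFinset := by
          subst h; simp
        simp only [List.tail_cons, List.zip_cons_cons, List.foldl_cons, if_pos h]
        rw [show (b :: u).zip u = (b :: u).zip (b :: u).tail from rfl, ih hpt (c + 1), hfin]
        simp only [List.length_cons]; push_cast; ring
      · have hnotmem : a ∉ (b :: u).toFinset := by
          simp only [List.mem_toFinset]
          intro hmem
          rcases List.mem_cons.mp hmem with h1 | h2
          · exact h h1
          · have hba : b ≤ a := (List.pairwise_cons.mp hpt).1 a h2
            exact h (le_antisymm hab hba)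
        have hfin : (a :: b :: u).toFinset = insert a (b :: u).toFinset := by simp
        simp only [List.tail_cons, List.zip_cons_cons, List.foldl_cons, if_neg h]
        rw [show (b :: u).zip u = (b :: u).zip (b :: u).tail from rfl, ih hpt c, hfin,
          Finset.card_insert_of_notMem hnotmem]
        simp only [List.length_cons]; push_cast; ring

-- the Python set of a list has as many elements as the list has distinct values
theorem ofList_length_eq_card (l : List String) :
    (PySem.Set.ofList l).length = l.toFinset.card := by
  have hnd : (PySem.Set.ofList l).Nodup := PySem.Set.nodup_ofList l
  have hfin : (PySem.Set.ofList l).toFinset = l.toFinset := by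
    ext x; simp [List.mem_toFinset, PySem.Set.mem_ofList]
  rw [← hfin, List.toFinset_card_of_nodup hnd]

-- ===== VERDICT (by name: the statement is the Claim_ definition above) =====
theorem count_repetitions_spec : Claim_equal_count_repetitions := by
  intro ciphertext index _
  unfold Spec_count_repetitions count_repetitions count_repetitions_alt
  have hA : List.foldl (fun acc i => acc ++ [PySem.Str.slice ciphertext (some i) (some (i + 16))])
      ([] : List String) (PySem.List.pyRange 0 (PySem.Str.len ciphertext) 16)
      = (PySem.List.pyRange 0 (PySem.Str.len ciphertext) 16).map
          (fun i => PySem.Str.slice ciphertext (some i) (some (i + 16))) := by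
    simpa using PySem.List.foldl_append_singleton_eq_map
      (fun i => PySem.Str.slice ciphertext (some i) (some (i + 16)))
      (PySem.List.pyRange 0 (PySem.Str.len ciphertext) 16) ([] : List String)
  set L := (PySem.List.pyRange 0 (PySem.Str.len ciphertext) 16).map
      (fun i => PySem.Str.slice ciphertext (some i) (some (i + 16))) with hL
  set S := PySem.List.sorted L (fun x => x) false with hS
  have htail : PySem.List.slice S (some 1) none = S.tail := by
    have := PySem.List.slice_from_natCast (xs := S) (a := 1)
    simpa [List.drop_one] using this
  have hpair : S.Pairwise (· ≤ ·) := by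
    simpa using PySem.List.sorted_pairwise L (fun x => x)
  have hperm : S.Perm L := PySem.List.sorted_perm L (fun x => x) false
  have hlen : S.length = L.length := hperm.length_eq
  have hfin : S.toFinset = L.toFinset := by
    ext x; simp [List.mem_toFinset, hperm.mem_iff]
  rw [hA]
  simp only [htail]
  rw [adj_count_sorted S hpair 0]
  rw [hlen, hfin, PySem.List.len_eq, PySem.List.len_eq, ofList_length_eq_card]
  simp
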